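-- pv_equiv track=rewrite | github.com/aniruddha1295/PDF_Extractor | invoice_extractor/text_table_parser.py | _find_product_invoice_page
-- ===== SOURCE A (Python) =====
-- from typing import Dict, List, Optional
--
-- def _find_product_invoice_page(page_texts: List[str]) -> Optional[str]:
--     """Find the page containing the actual product Tax Invoice (usually last page)."""
--     for text in reversed(page_texts):
--         has_tax_invoice = "Tax Invoice" in text
--         has_product_markers = any(kw in text for kw in ["TOTAL PRICE", "Grand Total", "Total items"])
--         has_order_data = "Order" in text and "OD" in text
--
--         if has_tax_invoice and (has_product_markers or has_order_data):
--             return text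
--     return None
-- ===== SOURCE B (Python) =====
-- from typing import List, Optional
--
-- def _find_product_invoice_page(page_texts: List[str]) -> Optional[str]:
--     """Find the page containing the actual product Tax Invoice (usually last page)."""
--     matches = [
--         text
--         for text in page_texts
--         if "Tax Invoice" in text
--         and (any(kw in text for kw in ["TOTAL PRICE", "Grand Total", "Total items"])
--              or ("Order" in text and "OD" in text))
--     ]
--     return matches[-1] if matches else None
-- ===== Notes on version B (the rewrite author's own statement) =====
-- stated objective: alternative
-- what changed: Replaces the reversed-order loop with early return by a forward list-comprehension filter of all qualifying pages followed by taking the last element (None if empty).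
import Mathlib
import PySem

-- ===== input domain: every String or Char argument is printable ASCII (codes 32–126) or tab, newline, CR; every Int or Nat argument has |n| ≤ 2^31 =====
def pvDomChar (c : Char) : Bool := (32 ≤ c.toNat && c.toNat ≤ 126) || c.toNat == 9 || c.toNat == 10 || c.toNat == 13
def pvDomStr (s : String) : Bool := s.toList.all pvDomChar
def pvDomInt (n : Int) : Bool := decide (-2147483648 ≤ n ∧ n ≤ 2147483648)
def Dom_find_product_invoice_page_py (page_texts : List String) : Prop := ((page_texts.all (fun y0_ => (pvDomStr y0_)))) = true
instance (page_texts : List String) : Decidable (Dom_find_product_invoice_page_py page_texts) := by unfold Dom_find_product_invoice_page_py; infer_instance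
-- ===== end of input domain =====

-- B replaces the reversed early-return loop by a forward filter plus last-element; same result, alternative decomposition.
-- ===== PORT A =====
def pvGuardA (text : String) : Bool :=
  let has_tax_invoice := PySem.Str.isIn "Tax Invoice" text
  let has_product_markers :=
    ["TOTAL PRICE", "Grand Total", "Total items"].any (fun kw => PySem.Str.isIn kw text)
  let has_order_data := PySem.Str.isIn "Order" text && PySem.Str.isIn "OD" text
  has_tax_invoice && (has_product_markers || has_order_data)

def pvLoopA : List String → Option String
  | [] => none
  | text :: rest => if pvGuardA text then some text else pvLoopA rest

def find_product_invoice_page_py (page_texts : List String) : Option String :=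
  pvLoopA page_texts.reverse

-- ===== PORT B =====
def pvGuardB (text : String) : Bool :=
  PySem.Str.isIn "Tax Invoice" text &&
    (["TOTAL PRICE", "Grand Total", "Total items"].any (fun kw => PySem.Str.isIn kw text) ||
      (PySem.Str.isIn "Order" text && PySem.Str.isIn "OD" text))

def find_product_invoice_page_py_alt (page_texts : List String) : Option String :=
  let ms := page_texts.filter pvGuardB
  ms.getLast?

-- ===== PRECONDITION & SPEC =====
def Spec_find_product_invoice_page_py (page_texts : List String) (out : Option String) : Prop := out = find_product_invoice_page_py_alt page_texts
instance (page_texts : List String) (out : Option String) : Decidable (Spec_find_product_invoice_page_py page_texts out) := by unfold Spec_find_product_invoice_page_py; infer_instance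

-- ===== CLAIM (what is proved, stated in full; the proofs are below) =====
def Claim_equal_find_product_invoice_page_py : Prop := ∀ (page_texts : List String), Dom_find_product_invoice_page_py page_texts → Spec_find_product_invoice_page_py page_texts (find_product_invoice_page_py page_texts)

-- ===== LEMMAS AND PROOFS =====
theorem pvGuard_funeq : pvGuardA = pvGuardB := rfl

theorem pvLoopA_eq_find? (l : List String) : pvLoopA l = l.find? pvGuardA := by
  induction l with
  | nil => rfl
  | cons x xs ih =>
    simp only [pvLoopA, List.find?]
    cases h : pvGuardA x with
    | false => simp [ih]
    | true => simp


-- ===== VERDICT (by name: the statement is the Claim_ definition above) =====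
theorem find_product_invoice_page_py_spec : Claim_equal_find_product_invoice_page_py := by
  intro page_texts _
  unfold Spec_find_product_invoice_page_py
  unfold find_product_invoice_page_py find_product_invoice_page_py_alt
  rw [pvLoopA_eq_find?, pvGuard_funeq]
  show page_texts.reverse.find? pvGuardB = (page_texts.filter pvGuardB).getLast?
  rw [List.getLast?_eq_head?_reverse, ← List.filter_reverse, List.head?_filter]
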